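-- pv_equiv track=rewrite | github.com/SaifulIslamReyad/cph | Functions for CP/sortStrCCAADDfromCADCAD.py | sortStrCCAADDfromCADCAD
-- ===== SOURCE A (Python) =====
-- def sortStrCCAADDfromCADCAD(old):
--     l=[]
--
--     for i in old:
--         l.append(old.index(i))
--     l.sort()
--     ll=[]
--     for i in l:
--         ll.append(old[i])
--     new= '' .join(ll)
--     return new
-- ===== SOURCE B (Python) =====
-- def sortStrCCAADDfromCADCAD(old):
--     counts = {}
--     for ch in old:
--         counts[ch] = counts.get(ch, 0) + 1
--     return ''.join(ch * cnt for ch, cnt in counts.items())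
-- ===== Notes on version B (the rewrite author's own statement) =====
-- stated objective: faster
-- what changed: Replaces the per-character first-index scan plus sort plus re-indexing with a single counting pass over the string (insertion-ordered dict) followed by emitting each character repeated by its count in first-appearance order.
import Mathlib
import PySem

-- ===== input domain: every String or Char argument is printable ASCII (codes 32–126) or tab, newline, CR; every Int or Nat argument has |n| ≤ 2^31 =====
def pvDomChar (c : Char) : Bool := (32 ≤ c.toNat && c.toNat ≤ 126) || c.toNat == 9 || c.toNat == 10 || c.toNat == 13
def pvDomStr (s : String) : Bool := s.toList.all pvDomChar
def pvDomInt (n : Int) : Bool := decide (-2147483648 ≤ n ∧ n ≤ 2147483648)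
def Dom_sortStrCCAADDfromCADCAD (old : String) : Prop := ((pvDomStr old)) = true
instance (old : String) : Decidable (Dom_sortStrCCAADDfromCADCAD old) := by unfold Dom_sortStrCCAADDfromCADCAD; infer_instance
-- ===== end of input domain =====

-- B replaces A's first-index-scan + sort + re-index with one counting pass and a grouped emit (asymptotically faster).

-- ===== PORT A =====
-- old.index(i) where i is a character taken from old: the first index of that
-- character (always found, so str.index never raises here) = PySem.List.index?
-- on the char list, total via .getD 0 (the none branch is unreachable).
def sortStrCCAADDfromCADCAD (old : String) : String :=
  let s := old.toList
  let l := s.foldl (fun acc i => acc ++ [(((PySem.List.index? s i).getD 0 : Nat) : Int)]) []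
  let ls := PySem.List.sorted l (fun x => x) false
  let ll := ls.foldl (fun acc i => acc ++ [PySem.List.pyGetD s i ' ']) []
  String.ofList ll   -- ''.join of single characters

-- ===== PORT B =====
def sortStrCCAADDfromCADCAD_alt (old : String) : String :=
  let s := old.toList
  let counts := s.foldl (fun d c => d.insert c (d.getD c 0 + 1)) (PySem.Dict.empty : PySem.Dict Char Int)
  String.ofList (counts.items.flatMap (fun p => List.replicate p.2.toNat p.1))   -- ''.join(ch*cnt …)

-- ===== PRECONDITION & SPEC =====
def Spec_sortStrCCAADDfromCADCAD (old : String) (out : String) : Prop := out = sortStrCCAADDfromCADCAD_alt old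
instance (old : String) (out : String) : Decidable (Spec_sortStrCCAADDfromCADCAD old out) := by unfold Spec_sortStrCCAADDfromCADCAD; infer_instance

-- ===== CLAIM (what is proved, stated in full; the proofs are below) =====
def Claim_equal_sortStrCCAADDfromCADCAD : Prop := ∀ (old : String), Dom_sortStrCCAADDfromCADCAD old → Spec_sortStrCCAADDfromCADCAD old (sortStrCCAADDfromCADCAD old)

-- ===== LEMMAS AND PROOFS =====

-- first index (as Nat) of a character in s
def pvIdx (s : List Char) (c : Char) : Nat := (PySem.List.index? s c).getD 0

theorem pvIdx_lt_length {s : List Char} {c : Char} (h : c ∈ s) :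
    pvIdx s c < s.length := by
  have hs : PySem.List.index? s c ≠ none := by
    simpa [PySem.List.index?_eq_none_iff] using h
  obtain ⟨k, hk⟩ := Option.ne_none_iff_exists'.mp hs
  obtain ⟨hlt, _, _⟩ := PySem.List.getElem_of_index?_eq_some hk
  show (PySem.List.index? s c).getD 0 < s.length
  rw [hk]; exact hlt

theorem get_pvIdx {s : List Char} {c : Char} (h : c ∈ s) :
    PySem.List.pyGetD s ((pvIdx s c : Nat) : Int) ' ' = c := by
  have hs : PySem.List.index? s c ≠ none := by
    simpa [PySem.List.index?_eq_none_iff] using h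
  obtain ⟨k, hk⟩ := Option.ne_none_iff_exists'.mp hs
  obtain ⟨hlt, hget, _⟩ := PySem.List.getElem_of_index?_eq_some hk
  have h1 : pvIdx s c = k := by show (PySem.List.index? s c).getD 0 = k; rw [hk]; rfl
  rw [h1, PySem.List.pyGetD_natCast, List.getD_eq_getElem?_getD,
    List.getElem?_eq_getElem hlt, Option.getD_some, hget]

theorem pvIdx_append_of_mem {s : List Char} {c : Char} (h : c ∈ s) (t : List Char) :
    pvIdx (s ++ t) c = pvIdx s c := by
  show (PySem.List.index? (s ++ t) c).getD 0 = (PySem.List.index? s c).getD 0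
  rw [PySem.List.index?_append_of_mem t h]

-- count of a flatMap of replicate-blocks over a Nodup list
theorem count_flatMap_replicate (l : List Char) (n : Char → Nat) (a : Char)
    (hnd : l.Nodup) :
    (l.flatMap fun k => List.replicate (n k) k).count a = if a ∈ l then n a else 0 := by
  induction l with
  | nil => simp
  | cons k t ih =>
    have hnd' := (List.nodup_cons.mp hnd).2
    have hk : k ∉ t := (List.nodup_cons.mp hnd).1
    by_cases hak : a = k
    · subst hak
      simp [List.flatMap_cons, List.count_append, ih hnd', hk]
    · simp [List.flatMap_cons, List.count_append, List.count_replicate, ih hnd',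
        hak, Ne.symm hak]

-- the grouped list is a permutation of s
theorem perm_flatMap_replicate (s : List Char) :
    ((PySem.List.dedup s).flatMap fun k => List.replicate (s.count k) k).Perm s := by
  rw [List.perm_iff_count]
  intro a
  rw [count_flatMap_replicate _ _ _ (PySem.List.nodup_dedup s)]
  by_cases ha : a ∈ s
  · simp [ha]
  · simp [ha, List.count_eq_zero_of_not_mem ha]

-- characters listed by dedup are in strictly increasing first-index order
theorem pairwise_pvIdx_dedup (s : List Char) :
    (PySem.List.dedup s).Pairwise (fun a b => pvIdx s a < pvIdx s b) := by
  induction s using List.reverseRecOn with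
  | nil => simp [PySem.List.dedup]
  | append_singleton s c ih =>
    have hded : PySem.List.dedup (s ++ [c])
        = PySem.Set.add (PySem.Set.ofList s) c := by
      simp [PySem.List.dedup_eq_ofList, PySem.Set.ofList_append_singleton]
    by_cases hc : c ∈ s
    · have hadd : PySem.Set.add (PySem.Set.ofList s) c = PySem.Set.ofList s := by
        simp [PySem.Set.add, PySem.Set.contains, hc, PySem.Set.mem_ofList]
      rw [hded, hadd, ← PySem.List.dedup_eq_ofList]
      refine ih.imp_of_mem ?_
      intro a b ha hb h
      rwa [pvIdx_append_of_mem (by rwa [← PySem.List.mem_dedup s]) [c],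
        pvIdx_append_of_mem (by rwa [← PySem.List.mem_dedup s]) [c]]
    · have hadd : PySem.Set.add (PySem.Set.ofList s) c = PySem.Set.ofList s ++ [c] := by
        simp [PySem.Set.add, PySem.Set.contains, hc, PySem.Set.mem_ofList]
      rw [hded, hadd]
      apply List.pairwise_append.mpr
      refine ⟨?_, by simp, ?_⟩
      · refine List.Pairwise.imp_of_mem ?_ (by simpa [PySem.List.dedup_eq_ofList] using ih)
        intro a b ha hb h
        have ha' : a ∈ s := by simpa [PySem.Set.mem_ofList] using ha
        have hb' : b ∈ s := by simpa [PySem.Set.mem_ofList] using hb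
        rwa [pvIdx_append_of_mem ha' [c], pvIdx_append_of_mem hb' [c]]
      · intro a ha b hb
        have ha' : a ∈ s := by simpa [PySem.Set.mem_ofList] using ha
        have hb' : b = c := by simpa using hb
        rw [hb']
        have hidx : pvIdx (s ++ [c]) c = s.length := by
          show (PySem.List.index? (s ++ [c]) c).getD 0 = s.length
          rw [PySem.List.index?_append_singleton_self s c hc]; rfl
        rw [pvIdx_append_of_mem ha' [c], hidx]
        exact pvIdx_lt_length ha'

-- pointwise-equal flatMap bodies on members
theorem flatMap_congr_mem {α β : Type} (l : List α) (F G : α → List β)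
    (h : ∀ k ∈ l, F k = G k) : l.flatMap F = l.flatMap G := by
  induction l with
  | nil => rfl
  | cons k t ih =>
    simp [List.flatMap_cons, h k (by simp),
      ih (fun x hx => h x (List.mem_cons_of_mem _ hx))]

-- strictly-increasing block values give a ≤-sorted flatMap of replicates
theorem pairwise_le_flatMap_replicate (l : List Char) (g : Char → Int) (n : Char → Nat)
    (h : l.Pairwise (fun a b => g a < g b)) :
    (l.flatMap fun k => List.replicate (n k) (g k)).Pairwise
      (fun a b => (a : Int) ≤ b) := by
  induction l with
  | nil => simp
  | cons k t ih =>
    rw [List.flatMap_cons]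
    apply List.pairwise_append.mpr
    refine ⟨?_, ih h.of_cons, ?_⟩
    · exact List.pairwise_replicate.mpr (Or.inr (le_refl _))
    · intro a ha b hb
      have ha' : a = g k := List.eq_of_mem_replicate ha
      obtain ⟨k', hk', hb'⟩ := List.mem_flatMap.mp hb
      have hb'' : b = g k' := List.eq_of_mem_replicate hb'
      subst ha'; subst hb''
      exact le_of_lt (List.rel_of_pairwise_cons h hk')

-- the sorted index list, characterised as grouped first-indices
theorem sorted_indices_eq (s : List Char) :
    PySem.List.sorted (s.map fun c => ((pvIdx s c : Nat) : Int)) (fun x => x) false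
      = (PySem.List.dedup s).flatMap
          (fun k => List.replicate (s.count k) ((pvIdx s k : Nat) : Int)) := by
  apply PySem.List.sorted_id_eq_of_perm_of_pairwise
  · have : ((PySem.List.dedup s).flatMap
        (fun k => List.replicate (s.count k) ((pvIdx s k : Nat) : Int)))
        = ((PySem.List.dedup s).flatMap fun k => List.replicate (s.count k) k).map
            (fun c => ((pvIdx s c : Nat) : Int)) := by
      rw [List.map_flatMap]
      exact flatMap_congr_mem _ _ _ (fun k _ => by simp [List.map_replicate])
    rw [this]
    exact (perm_flatMap_replicate s).map _
  · apply pairwise_le_flatMap_replicate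
    have := pairwise_pvIdx_dedup s
    exact this.imp (fun h => by exact_mod_cast h)

-- ===== VERDICT (by name: the statement is the Claim_ definition above) =====
theorem sortStrCCAADDfromCADCAD_spec : Claim_equal_sortStrCCAADDfromCADCAD := by
  intro old _
  unfold Spec_sortStrCCAADDfromCADCAD sortStrCCAADDfromCADCAD sortStrCCAADDfromCADCAD_alt
  set s := old.toList with hs
  simp only [PySem.List.foldl_append_singleton_eq_map, List.nil_append,
    PySem.Dict.foldl_insert_getD_add_one_eq_counter, PySem.Dict.items_counter]
  rw [show (fun c => (((PySem.List.index? s c).getD 0 : Nat) : Int))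
        = (fun c => ((pvIdx s c : Nat) : Int)) from rfl]
  rw [sorted_indices_eq s, List.map_flatMap, List.flatMap_map]
  congr 1
  apply flatMap_congr_mem
  intro k hk
  have hk' : k ∈ s := by
    rwa [PySem.List.dedup_eq_ofList, PySem.Set.mem_ofList] at hk
  simp [List.map_replicate, get_pvIdx hk']
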